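-- pv_equiv track=rewrite | github.com/tempure/algorithm-advance | OJ/projecteuler/level04/80.py | jarvis_sqrt_sum
-- ===== SOURCE A (Python) =====
-- def jarvis_sqrt_sum(n,prec=100):
--     a,b = 5*n,5
--     while len(str(b)) <= prec+3:
--         if a >= b:
--             a,b = a-b,b+10
--         else:
--             a,b = a*100,(b-b%10)*10+b%10
--     return sum([int(x) for x in str(b)[:prec]])
-- ===== SOURCE B (Python) =====
-- def jarvis_sqrt_sum(n, prec=100):
--     # Digit sum of the first `prec` digits of sqrt(n): scale n so the integer
--     # square root carries enough digits, then extract it by binary search.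
--     if prec <= 0:
--         return 0
--     M = n * 100 ** prec
--     lo, hi = 0, M + 1          # invariant: lo*lo <= M < hi*hi
--     while lo + 1 < hi:
--         mid = (lo + hi) // 2
--         if mid * mid <= M:
--             lo = mid
--         else:
--             hi = mid
--     return sum(int(d) for d in str(lo)[:prec])
-- ===== Notes on version B (the rewrite author's own statement) =====
-- stated objective: alternative
-- what changed: B replaces A's digit-by-digit remainder recurrence (repeated subtraction of an odd-number ladder, watching the decimal width of b) by scaling n to M = n*100^prec and extracting floor(sqrt(M)) with an explicit binary search, then summing the first prec digits of that integer; for prec <= 0 it returns 0 directly.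
-- intended difference: Where A's fixed prec+4-character window of b misaligns with the digit stream of sqrt(n): for prec = -1 (n >= 1) A returns the digit sum of an accidental negative-slice leftover while B returns 0, and for prec >= 1 with n >= 10^(2*prec+4) (on the |n| <= 2^31 domain: prec = 1 with n in [4e6,1e8) or n >= 4e8, prec = 2 with n >= 1.21e8 - exactly the inputs where the true digit sum is not also 1) A stops mid-climb and returns 1 while B returns the digit sum of the true first prec digits of sqrt(n), the intended value; A != B is proved everywhere in D_ (jarvis_sqrt_sum_tight). — e.g. on jarvis_sqrt_sum(1, -1): A returns 1, B returns 0
import Mathlib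
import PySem

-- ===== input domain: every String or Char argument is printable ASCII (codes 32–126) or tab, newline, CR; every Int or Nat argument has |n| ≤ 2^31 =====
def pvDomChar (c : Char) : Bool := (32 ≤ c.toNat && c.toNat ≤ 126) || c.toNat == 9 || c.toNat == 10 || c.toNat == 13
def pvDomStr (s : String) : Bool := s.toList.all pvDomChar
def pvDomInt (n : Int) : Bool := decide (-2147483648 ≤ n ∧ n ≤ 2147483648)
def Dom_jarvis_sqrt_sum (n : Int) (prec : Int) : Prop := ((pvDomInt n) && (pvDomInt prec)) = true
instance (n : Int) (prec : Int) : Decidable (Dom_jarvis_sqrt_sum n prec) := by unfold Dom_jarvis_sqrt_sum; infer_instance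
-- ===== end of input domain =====

-- B replaces A's per-digit remainder recurrence by an explicit binary search for
-- floor(sqrt(n * 100^prec)); equivalence is proved on Pre_ outside the stated D_ region.

-- ===== PORT A =====
-- sum([int(x) for x in str(m)[:prec]]) — the identical final line of both Pythons.
-- int(x) is PySem.Int.ofChars?; the .getD 0 default is unreachable here (every
-- sliced character is a decimal digit of a nonnegative integer).
def pyDigitSum (m : Int) (prec : Int) : Int :=
  ((PySem.List.slice (PySem.Int.toChars m) none (some prec)).map
    (fun c => (PySem.Int.ofChars? [c]).getD 0)).sum

-- A's while loop; the fuel only makes the recursion structural (Python A diverges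
-- for n ≤ 0 with prec ≥ -2, which Pre_ excludes) and is proved sufficient on Pre_.
def jsLoop (prec : Int) : Nat → Int → Int → Int
  | 0, _, b => b
  | f + 1, a, b =>
      if ((PySem.Int.toChars b).length : Int) ≤ prec + 3 then
        if b ≤ a then jsLoop prec f (a - b) (b + 10)
        else jsLoop prec f (a * 100) ((b - PySem.Int.mod b 10) * 10 + PySem.Int.mod b 10)
      else b

def jsFuel (n prec : Int) : Nat := (5 * n).toNat + 11 * (prec.toNat + 4) + 12

def jarvis_sqrt_sum (n : Int) (prec : Int) : Int :=
  pyDigitSum (jsLoop prec (jsFuel n prec) (5 * n) 5) prec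

-- ===== PORT B =====
-- binary search: largest lo with lo*lo ≤ M
def bsLoop (M lo hi : Int) : Int :=
  if h : lo + 1 < hi then
    if (PySem.Int.floordiv (lo + hi) 2) * (PySem.Int.floordiv (lo + hi) 2) ≤ M then
      bsLoop M (PySem.Int.floordiv (lo + hi) 2) hi
    else
      bsLoop M lo (PySem.Int.floordiv (lo + hi) 2)
  else lo
termination_by (hi - lo).toNat
decreasing_by
  · have h1 : lo + 1 ≤ PySem.Int.floordiv (lo + hi) 2 :=
      (PySem.Int.le_floordiv_iff_mul_le (by norm_num)).mpr (by omega)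
    omega
  · have h2 : PySem.Int.floordiv (lo + hi) 2 < hi :=
      (PySem.Int.floordiv_lt_iff_lt_mul (by norm_num)).mpr (by omega)
    omega

def jarvis_sqrt_sum_alt (n : Int) (prec : Int) : Int :=
  if prec ≤ 0 then 0
  else
    pyDigitSum (bsLoop (n * 100 ^ prec.toNat) 0 (n * 100 ^ prec.toNat + 1)) prec

-- ===== PRECONDITION & SPEC =====
-- Pre_ excludes exactly the inputs where Python A loops forever: n ≤ 0 with
-- prec ≥ -2 (b never grows past the length test).  For prec ≤ -3 the loop body
-- is never entered and A returns, for any n.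
def Pre_jarvis_sqrt_sum (n : Int) (prec : Int) : Prop := 1 ≤ n ∨ prec ≤ -3
instance (n : Int) (prec : Int) : Decidable (Pre_jarvis_sqrt_sum n prec) := by
  unfold Pre_jarvis_sqrt_sum; infer_instance

def pvWitness_jarvis_sqrt_sum : Int × Int := (2, 1)

-- Where A's fixed prec+4-character window of b misaligns with the digit stream of
-- sqrt(n) — prec = -1 (n ≥ 1), where A returns the digit sum of an accidental
-- negative-slice leftover, and prec ≥ 1 with n ≥ 10^(2*prec+4), where A stops
-- mid-climb and always returns 1 — B returns the digit sum of the true first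
-- prec digits of sqrt(n) (0 for prec ≤ 0), which is the intended value.
-- (On the domain |n| ≤ 2^31 the misalignment needs 10^(2*prec+4) ≤ n, hence
-- prec ≤ 2; the intervals below are exactly the inputs of that region on which
-- the true digit sum also differs from A's constant 1 — i.e. the first prec
-- digits of sqrt(n) are not 10…0 — so A ≠ B everywhere in D_, proved in
-- jarvis_sqrt_sum_tight.)
def D_jarvis_sqrt_sum (n : Int) (prec : Int) : Prop :=
  (1 ≤ n ∧ prec = -1)
    ∨ (prec = 1 ∧ ((4000000 ≤ n ∧ n < 100000000) ∨ 400000000 ≤ n))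
    ∨ (prec = 2 ∧ 121000000 ≤ n)
instance (n : Int) (prec : Int) : Decidable (D_jarvis_sqrt_sum n prec) := by
  unfold D_jarvis_sqrt_sum; infer_instance

def Spec_jarvis_sqrt_sum (n : Int) (prec : Int) (out : Int) : Prop :=
  ¬ D_jarvis_sqrt_sum n prec → out = jarvis_sqrt_sum_alt n prec
instance (n : Int) (prec : Int) (out : Int) : Decidable (Spec_jarvis_sqrt_sum n prec out) := by
  unfold Spec_jarvis_sqrt_sum; infer_instance

def pvDiffWitness_jarvis_sqrt_sum : Int × Int := (1, -1)
def pvDiffWitnessOut_jarvis_sqrt_sum : Int × Int := (1, 0)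

-- ===== CLAIM (what is proved, stated in full; the proofs are below) =====
def Claim_unchanged_jarvis_sqrt_sum : Prop := ∀ (n : Int) (prec : Int), Dom_jarvis_sqrt_sum n prec → Pre_jarvis_sqrt_sum n prec → Spec_jarvis_sqrt_sum n prec (jarvis_sqrt_sum n prec)
def Claim_exact_jarvis_sqrt_sum : Prop := ∀ (n : Int) (prec : Int), Dom_jarvis_sqrt_sum n prec → Pre_jarvis_sqrt_sum n prec → D_jarvis_sqrt_sum n prec → jarvis_sqrt_sum n prec ≠ jarvis_sqrt_sum_alt n prec
def Claim_changed_jarvis_sqrt_sum : Prop := Dom_jarvis_sqrt_sum (pvDiffWitness_jarvis_sqrt_sum.1) (pvDiffWitness_jarvis_sqrt_sum.2) ∧ Pre_jarvis_sqrt_sum (pvDiffWitness_jarvis_sqrt_sum.1) (pvDiffWitness_jarvis_sqrt_sum.2) ∧ D_jarvis_sqrt_sum (pvDiffWitness_jarvis_sqrt_sum.1) (pvDiffWitness_jarvis_sqrt_sum.2) ∧ jarvis_sqrt_sum (pvDiffWitness_jarvis_sqrt_sum.1) (pvDiffWitness_jarvis_sqrt_sum.2) = pvDiffWitnessOut_jarvis_sqrt_sum.1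 ∧ jarvis_sqrt_sum_alt (pvDiffWitness_jarvis_sqrt_sum.1) (pvDiffWitness_jarvis_sqrt_sum.2) = pvDiffWitnessOut_jarvis_sqrt_sum.2 ∧ pvDiffWitnessOut_jarvis_sqrt_sum.1 ≠ pvDiffWitnessOut_jarvis_sqrt_sum.2

-- ===== LEMMAS AND PROOFS =====

-- abbreviations for the proofs
def sqd (N e : Nat) : Nat := Nat.sqrt (N * 100 ^ e)
def Ld (m : Nat) : Nat := (Nat.toDigits 10 m).length

lemma toChars_natCast (m : Nat) : PySem.Int.toChars (m : Int) = Nat.toDigits 10 m := by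
  simp [PySem.Int.toChars]

-- `Nat.toDigitsCore` structure
lemma tdc_shift (f : Nat) : ∀ (n : Nat) (ds : List Char),
    Nat.toDigitsCore 10 f n ds = Nat.toDigitsCore 10 f n [] ++ ds := by
  induction f with
  | zero => intro n ds; simp [Nat.toDigitsCore]
  | succ f ih =>
    intro n ds
    simp only [Nat.toDigitsCore]
    by_cases h : n / 10 = 0
    · simp [h]
    · simp only [if_neg h]
      rw [ih (n / 10) ((n % 10).digitChar :: ds), ih (n / 10) [(n % 10).digitChar]]
      simp

lemma tdc_fuel (n : Nat) : ∀ (f f' : Nat), n < f → n < f' → ∀ ds,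
    Nat.toDigitsCore 10 f n ds = Nat.toDigitsCore 10 f' n ds := by
  induction n using Nat.strong_induction_on with
  | _ n ih =>
    intro f f' hf hf' ds
    obtain ⟨g, rfl⟩ : ∃ g, f = g + 1 := ⟨f - 1, by omega⟩
    obtain ⟨g', rfl⟩ : ∃ g', f' = g' + 1 := ⟨f' - 1, by omega⟩
    simp only [Nat.toDigitsCore]
    by_cases h : n / 10 = 0
    · simp [h]
    · simp only [if_neg h]
      exact ih (n / 10) (by omega) g g' (by omega) (by omega) _

lemma toDigits_small {n : Nat} (h : n < 10) : Nat.toDigits 10 n = [Nat.digitChar n] := by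
  simp only [Nat.toDigits, Nat.toDigitsCore]
  rw [if_pos (Nat.div_eq_of_lt h), Nat.mod_eq_of_lt h]

lemma toDigits_app (n r : Nat) (hn : 1 ≤ n) (hr : r < 10) :
    Nat.toDigits 10 (10 * n + r) = Nat.toDigits 10 n ++ [Nat.digitChar r] := by
  have hdiv : (10 * n + r) / 10 = n := by omega
  have hmod : (10 * n + r) % 10 = r := by omega
  have h1 : Nat.toDigits 10 (10 * n + r) = Nat.toDigitsCore 10 (10 * n + r) n [r.digitChar] := by
    simp only [Nat.toDigits, Nat.toDigitsCore]
    rw [if_neg (by omega), hdiv, hmod]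
  rw [h1, tdc_fuel n (10 * n + r) (n + 1) (by omega) (by omega), tdc_shift, Nat.toDigits]

lemma Ld_app (n r : Nat) (hn : 1 ≤ n) (hr : r < 10) : Ld (10 * n + r) = Ld n + 1 := by
  simp [Ld, toDigits_app n r hn hr]

lemma Ld_log (n : Nat) : Ld n = Nat.log 10 n + 1 := by
  induction n using Nat.strong_induction_on with
  | _ n ih =>
    by_cases h : n < 10
    · rw [show Ld n = 1 by simp [Ld, toDigits_small h]]
      rw [Nat.log_eq_zero_iff.mpr (Or.inl h)]
    · have h1 : 1 ≤ n / 10 := by omega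
      have h2 : n = 10 * (n / 10) + n % 10 := by omega
      have h3 : Ld n = Ld (n / 10) + 1 := by
        conv_lhs => rw [h2]
        exact Ld_app _ _ h1 (by omega)
      have h4 := ih (n / 10) (by omega)
      have h5 : Nat.log 10 (n / 10) = Nat.log 10 n - 1 := Nat.log_div_base ..
      have h6 : 0 < Nat.log 10 n := Nat.log_pos (by norm_num) (by omega)
      omega

lemma Ld_mono {m n : Nat} (h : m ≤ n) : Ld m ≤ Ld n := by
  simp only [Ld_log]
  exact Nat.add_le_add_right (Nat.log_mono_right h) 1

lemma Ld_pos (n : Nat) : 1 ≤ Ld n := by simp [Ld_log]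

lemma Ld_le_of_lt_pow {n k : Nat} (hn : 1 ≤ n) (h : n < 10 ^ k) : Ld n ≤ k := by
  have := (Nat.log_lt_iff_lt_pow (by norm_num) (by omega)).mpr h
  simp only [Ld_log]; omega

-- sqrt stream facts
lemma sqd_pos {N : Nat} (hN : 1 ≤ N) (e : Nat) : 1 ≤ sqd N e := by
  exact Nat.le_sqrt.mpr (by nlinarith [Nat.one_le_pow e 100 (show 0 < 100 by norm_num)])

lemma sqd_sq_le (N e : Nat) : sqd N e * sqd N e ≤ N * 100 ^ e := Nat.sqrt_le _

lemma sqd_lt_succ (N e : Nat) : N * 100 ^ e < (sqd N e + 1) * (sqd N e + 1) :=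
  Nat.lt_succ_sqrt _

lemma sqd_step {N : Nat} (hN : 1 ≤ N) (e : Nat) :
    10 * sqd N e ≤ sqd N (e + 1) ∧ sqd N (e + 1) ≤ 10 * sqd N e + 9 := by
  constructor
  · apply Nat.le_sqrt.mpr
    have h := Nat.sqrt_le (N * 100 ^ e)
    calc 10 * sqd N e * (10 * sqd N e) = 100 * (sqd N e * sqd N e) := by ring
    _ ≤ 100 * (N * 100 ^ e) := by exact Nat.mul_le_mul_left _ h
    _ = N * 100 ^ (e + 1) := by ring
  · have h : sqd N (e + 1) < 10 * sqd N e + 10 := by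
      apply Nat.sqrt_lt.mpr
      have hlt : N * 100 ^ e < (sqd N e + 1) * (sqd N e + 1) := Nat.lt_succ_sqrt (N * 100 ^ e)
      calc N * 100 ^ (e + 1) = 100 * (N * 100 ^ e) := by ring
      _ < 100 * ((sqd N e + 1) * (sqd N e + 1)) := by nlinarith [hlt]
      _ = (10 * sqd N e + 10) * (10 * sqd N e + 10) := by ring
    omega

lemma sqd_len {N : Nat} (hN : 1 ≤ N) (e : Nat) : Ld (sqd N e) = Ld (sqd N 0) + e := by
  induction e with
  | zero => rfl
  | succ e ih =>
    obtain ⟨hlo, hhi⟩ := sqd_step hN e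
    have h2 : sqd N (e + 1) = 10 * sqd N e + (sqd N (e + 1) - 10 * sqd N e) := by omega
    rw [h2, Ld_app _ _ (sqd_pos hN e) (by omega), ih]
    omega

-- main A-loop characterisation
lemma jsLoop_main {N p : Nat} (hN : 1 ≤ N) (hp : 1 ≤ p) (hbig : N < 10 ^ (2 * p + 4)) :
    ∀ (fuel e D : Nat),
      e + Ld (sqd N 0) ≤ p + 2 →
      (e = 0 → D ≤ sqd N 0) →
      (∀ e', e = e' + 1 → 10 * sqd N e' ≤ D ∧ D ≤ sqd N e) →
      (sqd N e - D) + 11 * ((p + 2 - Ld (sqd N 0)) - e) + 2 ≤ fuel →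
      jsLoop (p : Int) fuel (5 * (((N * 100 ^ e : Nat) : Int) - ((D * D : Nat) : Int)))
          (10 * (D : Int) + 5)
        = ((100 * sqd N (p + 2 - Ld (sqd N 0)) + 5 : Nat) : Int) := by
  intro fuel
  induction fuel with
  | zero => intro e D h1 h2 h3 hf; omega
  | succ f ih =>
    intro e D h1 h2 h3 hf
    have hI1 : 1 ≤ Ld (sqd N 0) := Ld_pos _
    have hIp : Ld (sqd N 0) ≤ p + 2 := by omega
    have hDs : D ≤ sqd N e := by
      cases e with
      | zero => exact h2 rfl
      | succ e' => exact (h3 e' rfl).2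
    -- length of the current b = 10*D+5 is at most p+3
    have hLb : Ld (10 * D + 5) ≤ p + 3 := by
      cases e with
      | zero =>
        rcases Nat.eq_zero_or_pos D with hD0 | hD1
        · subst hD0
          have h5 : Ld (10 * 0 + 5) = 1 := by decide
          omega
        · have := Ld_app D 5 hD1 (by norm_num)
          have := Ld_mono (h2 rfl)
          omega
      | succ e' =>
        obtain ⟨hlo, hhi⟩ := h3 e' rfl
        obtain ⟨_, hs9⟩ := sqd_step hN e'
        have hD' : D = 10 * sqd N e' + (D - 10 * sqd N e') := by omega
        have hLD : Ld D = Ld (sqd N e') + 1 := by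
          conv_lhs => rw [hD']
          exact Ld_app _ _ (sqd_pos hN e') (by omega)
        have hLs : Ld (sqd N e') = Ld (sqd N 0) + e' := sqd_len hN e'
        have hD1 : 1 ≤ D := by have := sqd_pos hN e'; omega
        have := Ld_app D 5 hD1 (by norm_num)
        omega
    simp only [jsLoop]
    have hb : (10 * (D:Int) + 5) = ((10 * D + 5 : Nat) : Int) := by push_cast; ring
    rw [hb, toChars_natCast]
    rw [if_pos (by exact_mod_cast hLb : ((Nat.toDigits 10 (10 * D + 5)).length : Int) ≤ (p:Int) + 3)]
    by_cases hstep : D + 1 ≤ sqd N e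
    · -- climb: a ≥ b
      have hnat : (D + 1) * (D + 1) ≤ N * 100 ^ e := Nat.le_sqrt.mp hstep
      have hble : ((10 * D + 5 : Nat) : Int) ≤ 5 * (((N * 100 ^ e : Nat) : Int) - ((D * D : Nat) : Int)) := by
        push_cast
        nlinarith [hnat]
      rw [if_pos hble]
      have ea : 5 * (((N * 100 ^ e : Nat) : Int) - ((D * D : Nat) : Int)) - ((10 * D + 5 : Nat) : Int)
          = 5 * (((N * 100 ^ e : Nat) : Int) - (((D + 1) * (D + 1) : Nat) : Int)) := by push_cast; ring
      have eb : ((10 * D + 5 : Nat) : Int) + 10 = 10 * ((D + 1 : Nat) : Int) + 5 := by push_cast; ring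
      rw [ea, eb]
      have := ih e (D + 1) h1 (fun h => by subst h; exact hstep)
        (fun e' he' => ⟨by have := (h3 e' he').1; omega, by subst he'; exact hstep⟩)
        (by omega)
      exact_mod_cast this
    · -- D = sqd N e : descend a digit
      have hD : D = sqd N e := by omega
      have hbig2 : N * 100 ^ e < (D + 1) * (D + 1) := by rw [hD]; exact sqd_lt_succ N e
      have hDD : D * D ≤ N * 100 ^ e := by rw [hD]; exact sqd_sq_le N e
      have hnot : ¬ (((10 * D + 5 : Nat) : Int) ≤ 5 * (((N * 100 ^ e : Nat) : Int) - ((D * D : Nat) : Int))) := by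
        push_cast
        nlinarith [hbig2, hDD]
      rw [if_neg hnot]
      have hmod : PySem.Int.mod (((10 * D + 5 : Nat) : Int)) 10 = 5 := by
        rw [PySem.Int.mod_eq_emod_of_pos (by norm_num)]
        push_cast
        omega
      rw [hmod]
      have eb : (((10 * D + 5 : Nat) : Int) - 5) * 10 + 5 = 10 * ((10 * D : Nat) : Int) + 5 := by
        push_cast; ring
      have ea : 5 * (((N * 100 ^ e : Nat) : Int) - ((D * D : Nat) : Int)) * 100
          = 5 * (((N * 100 ^ (e + 1) : Nat) : Int) - (((10 * D) * (10 * D) : Nat) : Int)) := by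
        push_cast; ring
      rw [eb, ea]
      by_cases hend : e + 1 + Ld (sqd N 0) ≤ p + 2
      · have hstep2 := sqd_step hN e
        apply ih (e + 1) (10 * D) hend (by omega)
          (fun e' he' => by
            have : e' = e := by omega
            subst this
            exact ⟨by omega, by rw [hD]; exact hstep2.1⟩)
        omega
      · -- e = p + 2 - Ld (sqd N 0): one more check, then stop
        have heT : e = p + 2 - Ld (sqd N 0) := by omega
        obtain ⟨f', rfl⟩ : ∃ f', f = f' + 1 := ⟨f - 1, by omega⟩
        simp only [jsLoop]
        have hb2 : (10 * ((10 * D : Nat) : Int) + 5) = ((10 * (10 * D) + 5 : Nat) : Int) := by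
          push_cast; ring
        rw [hb2, toChars_natCast]
        have hD1 : 1 ≤ D := by rw [hD]; exact sqd_pos hN e
        have hL2 : Ld (10 * D) = Ld D + 1 := by
          have h10 : 10 * D = 10 * D + 0 := rfl
          rw [h10]
          exact Ld_app D 0 hD1 (by norm_num)
        have hL1 : Ld (10 * (10 * D) + 5) = Ld (10 * D) + 1 :=
          Ld_app (10 * D) 5 (by omega) (by norm_num)
        have hLD : Ld D = Ld (sqd N 0) + e := by rw [hD]; exact sqd_len hN e
        have hcond2 : ¬ (((Nat.toDigits 10 (10 * (10 * D) + 5)).length : Int) ≤ (p:Int) + 3) := by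
          have : Ld (10 * (10 * D) + 5) = p + 4 := by omega
          have h' : (Nat.toDigits 10 (10 * (10 * D) + 5)).length = p + 4 := this
          rw [h']
          push_cast
          omega
        rw [if_neg hcond2]
        rw [hD, heT]
        push_cast
        ring


lemma jsLoop_stop (prec : Int) (fuel : Nat) (a b : Int)
    (h : ¬ ((PySem.Int.toChars b).length : Int) ≤ prec + 3) (hf : 1 ≤ fuel) :
    jsLoop prec fuel a b = b := by
  cases fuel with
  | zero => omega
  | succ f => simp [jsLoop, h]

-- binary-search characterisation
lemma bsLoop_correct (M : Int) : ∀ (lo hi : Int), 0 ≤ lo → lo * lo ≤ M → M < hi * hi →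
    lo < hi → bsLoop M lo hi = ((Nat.sqrt M.toNat : Nat) : Int) := by
  intro lo hi
  induction lo, hi using bsLoop.induct M with
  | case1 lo hi h hle ih =>
    intro h0 hlo hhi hlh
    rw [bsLoop, dif_pos h, if_pos hle]
    have h1 : lo + 1 ≤ PySem.Int.floordiv (lo + hi) 2 :=
      (PySem.Int.le_floordiv_iff_mul_le (by norm_num)).mpr (by omega)
    have h2 : PySem.Int.floordiv (lo + hi) 2 < hi :=
      (PySem.Int.floordiv_lt_iff_lt_mul (by norm_num)).mpr (by omega)
    exact ih (by omega) hle hhi (by omega)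
  | case2 lo hi h hgt ih =>
    intro h0 hlo hhi hlh
    rw [bsLoop, dif_pos h, if_neg hgt]
    have h1 : lo + 1 ≤ PySem.Int.floordiv (lo + hi) 2 :=
      (PySem.Int.le_floordiv_iff_mul_le (by norm_num)).mpr (by omega)
    exact ih h0 hlo (by omega) (by omega)
  | case3 lo hi h =>
    intro h0 hlo hhi hlh
    rw [bsLoop, dif_neg h]
    have hhi' : M < (lo + 1) * (lo + 1) := by
      have he : hi = lo + 1 := by omega
      rwa [he] at hhi
    have hM0 : 0 ≤ M := le_trans (mul_nonneg h0 h0) hlo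
    have e1 : lo.toNat * lo.toNat ≤ M.toNat := by
      zify; push_cast [Int.toNat_of_nonneg h0, Int.toNat_of_nonneg hM0]; exact hlo
    have e2 : M.toNat < (lo.toNat + 1) * (lo.toNat + 1) := by
      zify; push_cast [Int.toNat_of_nonneg h0, Int.toNat_of_nonneg hM0]; exact hhi'
    have hs1 : lo.toNat ≤ Nat.sqrt M.toNat := Nat.le_sqrt.mpr e1
    have hs2 : Nat.sqrt M.toNat < lo.toNat + 1 := Nat.sqrt_lt.mpr e2
    have h4 : Nat.sqrt M.toNat = lo.toNat := by omega
    rw [h4, Int.toNat_of_nonneg h0]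

-- digit-prefix stability
lemma take_stable {N : Nat} (hN : 1 ≤ N) (p : Nat) :
    ∀ (k e : Nat), p ≤ Ld (sqd N e) →
      List.take p (Nat.toDigits 10 (sqd N (e + k))) = List.take p (Nat.toDigits 10 (sqd N e)) := by
  intro k
  induction k with
  | zero => intro e _; rfl
  | succ k ih =>
    intro e hpe
    obtain ⟨hlo, hhi⟩ := sqd_step hN (e + k)
    have hgoal : e + (k + 1) = (e + k) + 1 := by omega
    rw [hgoal]
    have h2 : sqd N ((e + k) + 1) = 10 * sqd N (e + k) + (sqd N ((e + k) + 1) - 10 * sqd N (e + k)) := by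
      omega
    rw [h2, toDigits_app _ _ (sqd_pos hN _) (by omega)]
    rw [List.take_append_of_le_length]
    · exact ih e hpe
    · have hlen : Ld (sqd N (e + k)) = Ld (sqd N 0) + (e + k) := sqd_len hN _
      have hlen2 : Ld (sqd N e) = Ld (sqd N 0) + e := sqd_len hN _
      show p ≤ (Nat.toDigits 10 (sqd N (e + k))).length
      have h3 : (Nat.toDigits 10 (sqd N (e + k))).length = Ld (sqd N (e + k)) := rfl
      omega

lemma pyDigitSum_natCast (x q : Nat) :
    pyDigitSum (x : Int) (q : Int)
      = ((List.take q (Nat.toDigits 10 x)).map (fun c => (PySem.Int.ofChars? [c]).getD 0)).sum := by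
  rw [pyDigitSum, toChars_natCast, PySem.List.slice_to_natCast]

lemma pyDigitSum_zero (m : Int) : pyDigitSum m 0 = 0 := by
  rw [pyDigitSum, show (0 : Int) = ((0 : Nat) : Int) from rfl, PySem.List.slice_to_natCast]
  simp

-- int(c) for a digit character round-trips to its value
lemma rtDigit (d : Nat) (hd : d < 10) :
    (PySem.Int.ofChars? [Nat.digitChar d]).getD 0 = (d : Int) := by
  interval_cases d <;> decide

-- the leading decimal digit
lemma toDigits_take1 (k : Nat) : ∀ s : Nat, 10 ^ k ≤ s → s < 10 ^ (k + 1) →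
    List.take 1 (Nat.toDigits 10 s) = [Nat.digitChar (s / 10 ^ k)] := by
  induction k with
  | zero =>
    intro s h1 h2
    simp only [pow_zero, pow_one] at h1 h2 ⊢
    rw [toDigits_small h2, Nat.div_one]
    rfl
  | succ k ih =>
    intro s h1 h2
    have hq1 : 10 ^ k ≤ s / 10 := by
      rw [Nat.le_div_iff_mul_le (by norm_num)]
      calc 10 ^ k * 10 = 10 ^ (k + 1) := by ring
      _ ≤ s := h1
    have hq2 : s / 10 < 10 ^ (k + 1) := by
      rw [Nat.div_lt_iff_lt_mul (by norm_num)]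
      calc s < 10 ^ (k + 2) := h2
      _ = 10 ^ (k + 1) * 10 := by ring
    have hs : s = 10 * (s / 10) + s % 10 := by omega
    conv_lhs => rw [hs]
    rw [toDigits_app _ _ (by have := Nat.one_le_pow k 10 (by norm_num); omega) (by omega)]
    rw [List.take_append_of_le_length (Ld_pos (s / 10))]
    rw [ih (s / 10) hq1 hq2, Nat.div_div_eq_div_mul]
    rw [show 10 * 10 ^ k = 10 ^ (k + 1) by ring]

-- the two leading decimal digits
lemma toDigits_take2 (k : Nat) : ∀ s : Nat, 1 ≤ k → 10 ^ k ≤ s → s < 10 ^ (k + 1) →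
    List.take 2 (Nat.toDigits 10 s)
      = [Nat.digitChar (s / 10 ^ k), Nat.digitChar (s / 10 ^ (k - 1) % 10)] := by
  induction k with
  | zero => intro s h0; omega
  | succ k ih =>
    intro s _ h1 h2
    have hq1 : 10 ^ k ≤ s / 10 := by
      rw [Nat.le_div_iff_mul_le (by norm_num)]
      calc 10 ^ k * 10 = 10 ^ (k + 1) := by ring
      _ ≤ s := h1
    have hq2 : s / 10 < 10 ^ (k + 1) := by
      rw [Nat.div_lt_iff_lt_mul (by norm_num)]
      calc s < 10 ^ (k + 2) := h2
      _ = 10 ^ (k + 1) * 10 := by ring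
    have hs : s = 10 * (s / 10) + s % 10 := by omega
    conv_lhs => rw [hs]
    rw [toDigits_app _ _ (by have := Nat.one_le_pow k 10 (by norm_num); omega) (by omega)]
    rcases Nat.eq_zero_or_pos k with hk0 | hk1
    · subst hk0
      have hsmall : s / 10 < 10 := by simpa using hq2
      rw [toDigits_small hsmall]
      have e1 : s / 10 ^ (0 + 1) = s / 10 := by norm_num
      have e2 : s / 10 ^ (0 + 1 - 1) % 10 = s % 10 := by norm_num
      rw [e1, e2]
      rfl
    · have hlen : 2 ≤ (Nat.toDigits 10 (s / 10)).length := by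
        have : Ld (s / 10) = Nat.log 10 (s / 10) + 1 := Ld_log _
        have hlog : 1 ≤ Nat.log 10 (s / 10) := by
          have h10 : 10 ≤ s / 10 := le_trans (by
            calc (10:Nat) = 10 ^ 1 := (pow_one 10).symm
            _ ≤ 10 ^ k := Nat.pow_le_pow_right (by norm_num) hk1) hq1
          exact Nat.log_pos (by norm_num) h10
        show 2 ≤ Ld (s / 10)
        omega
      rw [List.take_append_of_le_length hlen]
      rw [ih (s / 10) hk1 hq1 hq2]
      rw [Nat.div_div_eq_div_mul, show 10 * 10 ^ k = 10 ^ (k + 1) by ring]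
      rw [Nat.div_div_eq_div_mul, show 10 * 10 ^ (k - 1) = 10 ^ k by
        rw [← pow_succ']
        congr 1
        omega]
      rfl

-- the first climb, stopped by the length test at D = t (phase 0 only)
lemma jsClimb (N : Nat) (prec : Int) (t : Nat) (ht : t ≤ Nat.sqrt N)
    (hstop : ¬ ((Ld (10 * t + 5) : Int) ≤ prec + 3))
    (hgo : ∀ D : Nat, D < t → ((Ld (10 * D + 5) : Int) ≤ prec + 3)) :
    ∀ (fuel D : Nat), D ≤ t → t - D + 1 ≤ fuel →
      jsLoop prec fuel (5 * ((N : Int) - ((D * D : Nat) : Int))) (10 * (D : Int) + 5)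
        = 10 * (t : Int) + 5 := by
  intro fuel
  induction fuel with
  | zero => intro D h1 h2; omega
  | succ f ih =>
    intro D hD hf
    simp only [jsLoop]
    rw [show (10 * (D : Int) + 5) = ((10 * D + 5 : Nat) : Int) by push_cast; ring,
      toChars_natCast]
    by_cases hDt : D = t
    · subst hDt
      rw [if_neg (by exact_mod_cast hstop)]
      push_cast
      ring
    · have hlt : D < t := lt_of_le_of_ne hD hDt
      rw [if_pos (by exact_mod_cast hgo D hlt)]
      have hD1 : D + 1 ≤ Nat.sqrt N := le_trans hlt ht
      have hsq : (D + 1) * (D + 1) ≤ N := Nat.le_sqrt.mp hD1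
      rw [if_pos (by push_cast; nlinarith [hsq])]
      have ea : 5 * ((N : Int) - ((D * D : Nat) : Int)) - ((10 * D + 5 : Nat) : Int)
          = 5 * ((N : Int) - (((D + 1) * (D + 1) : Nat) : Int)) := by push_cast; ring
      have eb : ((10 * D + 5 : Nat) : Int) + 10 = 10 * ((D + 1 : Nat) : Int) + 5 := by
        push_cast; ring
      rw [ea, eb]
      exact ih (D + 1) hlt (by omega)

-- prec = -1 with sqrt(n) ≤ 9: climb to sqrt, one descend, then stop at 100*sqrt+5
lemma jsSmall (N : Nat) (hN : 1 ≤ N) (hs : Nat.sqrt N ≤ 9) :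
    ∀ (fuel D : Nat), D ≤ Nat.sqrt N → (Nat.sqrt N - D) + 2 ≤ fuel →
      jsLoop (-1) fuel (5 * ((N : Int) - ((D * D : Nat) : Int))) (10 * (D : Int) + 5)
        = ((100 * Nat.sqrt N + 5 : Nat) : Int) := by
  intro fuel
  induction fuel with
  | zero => intro D h1 h2; omega
  | succ f ih =>
    intro D hD hf
    simp only [jsLoop]
    rw [show (10 * (D : Int) + 5) = ((10 * D + 5 : Nat) : Int) by push_cast; ring,
      toChars_natCast]
    have hcond : ((Nat.toDigits 10 (10 * D + 5)).length : Int) ≤ -1 + 3 := by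
      have h95 : Ld (10 * D + 5) ≤ Ld 95 := Ld_mono (by omega)
      have h2 : Ld 95 = 2 := by decide
      show ((Ld (10 * D + 5) : Nat) : Int) ≤ -1 + 3
      have : Ld (10 * D + 5) ≤ 2 := by omega
      exact_mod_cast by omega
    rw [if_pos hcond]
    by_cases hDt : D = Nat.sqrt N
    · subst hDt
      have hbig2 : N < (Nat.sqrt N + 1) * (Nat.sqrt N + 1) := Nat.lt_succ_sqrt N
      have hDD : Nat.sqrt N * Nat.sqrt N ≤ N := Nat.sqrt_le N
      rw [if_neg (by push_cast; nlinarith [hbig2, hDD])]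
      have hmod : PySem.Int.mod (((10 * Nat.sqrt N + 5 : Nat) : Int)) 10 = 5 := by
        rw [PySem.Int.mod_eq_emod_of_pos (by norm_num)]
        push_cast
        omega
      rw [hmod]
      obtain ⟨f', rfl⟩ : ∃ f', f = f' + 1 := ⟨f - 1, by omega⟩
      simp only [jsLoop]
      have eb : (((10 * Nat.sqrt N + 5 : Nat) : Int) - 5) * 10 + 5
          = ((100 * Nat.sqrt N + 5 : Nat) : Int) := by push_cast; ring
      rw [eb, toChars_natCast]
      have hsq1 : 1 ≤ Nat.sqrt N := Nat.le_sqrt.mpr (by nlinarith [hN])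
      have hL : Ld (100 * Nat.sqrt N + 5) = 3 := by
        have e1 : 100 * Nat.sqrt N + 5 = 10 * (10 * Nat.sqrt N) + 5 := by ring
        have e2 : 10 * Nat.sqrt N = 10 * Nat.sqrt N + 0 := by ring
        rw [e1, Ld_app _ 5 (by omega) (by norm_num), e2,
          Ld_app _ 0 (by omega) (by norm_num)]
        have : Ld (Nat.sqrt N) = 1 := by
          rw [show Ld (Nat.sqrt N) = (Nat.toDigits 10 (Nat.sqrt N)).length from rfl,
            toDigits_small (by omega)]
          rfl
        omega
      rw [if_neg (by
        show ¬ ((Ld (100 * Nat.sqrt N + 5) : Nat) : Int) ≤ -1 + 3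
        rw [hL]
        norm_num)]
    · have hlt : D < Nat.sqrt N := lt_of_le_of_ne hD hDt
      have hsq : (D + 1) * (D + 1) ≤ N := Nat.le_sqrt.mp hlt
      rw [if_pos (by push_cast; nlinarith [hsq])]
      have ea : 5 * ((N : Int) - ((D * D : Nat) : Int)) - ((10 * D + 5 : Nat) : Int)
          = 5 * ((N : Int) - (((D + 1) * (D + 1) : Nat) : Int)) := by push_cast; ring
      have eb : ((10 * D + 5 : Nat) : Int) + 10 = 10 * ((D + 1 : Nat) : Int) + 5 := by
        push_cast; ring
      rw [ea, eb]
      exact ih (D + 1) hlt (by omega)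

-- B's value as a digit sum of the scaled integer square root
lemma alt_char (N p : Nat) (hp : 1 ≤ p) :
    jarvis_sqrt_sum_alt (N : Int) (p : Int)
      = ((List.take p (Nat.toDigits 10 (Nat.sqrt (N * 100 ^ p)))).map
          (fun c => (PySem.Int.ofChars? [c]).getD 0)).sum := by
  rw [jarvis_sqrt_sum_alt, if_neg (by exact_mod_cast by omega : ¬ ((p : Int) ≤ 0))]
  have hMcast : ((N : Int) * 100 ^ ((p : Int)).toNat) = ((N * 100 ^ p : Nat) : Int) := by
    rw [Int.toNat_natCast]; push_cast; ring
  rw [hMcast]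
  have hM0 : (0 : Int) ≤ ((N * 100 ^ p : Nat) : Int) := Int.natCast_nonneg _
  rw [bsLoop_correct _ 0 _ (le_refl 0) (by simpa using hM0) (by nlinarith [hM0]) (by omega)]
  rw [Int.toNat_natCast, pyDigitSum_natCast]

-- A's value when the integer part of sqrt(n) overflows the prec+4 window (prec = 1, 2):
-- the first climb hits D = 10^(prec+2) and A returns the digit sum of 10^(prec+3)+5
-- truncated to prec characters, i.e. 1
lemma A_one1 (N : Nat) (hsq : 1000 ≤ Nat.sqrt N) : jarvis_sqrt_sum (N : Int) (1 : Int) = 1 := by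
  have hgo : ∀ D : Nat, D < 1000 → ((Ld (10 * D + 5) : Int) ≤ (1 : Int) + 3) := by
    intro D hD
    have h1 : Ld (10 * D + 5) ≤ Ld 9995 := Ld_mono (by omega)
    have h2 : Ld 9995 = 4 := by decide
    push_cast
    omega
  have hA := jsClimb N (1 : Int) 1000 hsq
    (by rw [show Ld (10 * 1000 + 5) = 5 by decide]; norm_num) hgo
  rw [jarvis_sqrt_sum]
  have hNlarge : 1000 ≤ N := le_trans hsq (Nat.sqrt_le_self N)
  have hloop : jsLoop (1 : Int) (jsFuel (N : Int) (1 : Int)) (5 * (N : Int)) 5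
      = 10 * ((1000 : Nat) : Int) + 5 := by
    rw [show (5 * (N : Int)) = 5 * ((N : Int) - ((0 * 0 : Nat) : Int)) by push_cast; ring,
      show (5 : Int) = 10 * ((0 : Nat) : Int) + 5 by norm_num]
    apply hA _ 0 (by omega)
    rw [jsFuel, show (5 * (N : Int)) = ((5 * N : Nat) : Int) by push_cast; ring,
      Int.toNat_natCast, show ((1 : Int)).toNat = 1 from rfl]
    omega
  rw [hloop, show (10 * ((1000 : Nat) : Int) + 5) = (10005 : Int) by norm_num]
  decide

lemma A_one2 (N : Nat) (hsq : 10000 ≤ Nat.sqrt N) : jarvis_sqrt_sum (N : Int) (2 : Int) = 1 := by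
  have hgo : ∀ D : Nat, D < 10000 → ((Ld (10 * D + 5) : Int) ≤ (2 : Int) + 3) := by
    intro D hD
    have h1 : Ld (10 * D + 5) ≤ Ld 99995 := Ld_mono (by omega)
    have h2 : Ld 99995 = 5 := by decide
    push_cast
    omega
  have hA := jsClimb N (2 : Int) 10000 hsq
    (by rw [show Ld (10 * 10000 + 5) = 6 by decide]; norm_num) hgo
  rw [jarvis_sqrt_sum]
  have hNlarge : 10000 ≤ N := le_trans hsq (Nat.sqrt_le_self N)
  have hloop : jsLoop (2 : Int) (jsFuel (N : Int) (2 : Int)) (5 * (N : Int)) 5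
      = 10 * ((10000 : Nat) : Int) + 5 := by
    rw [show (5 * (N : Int)) = 5 * ((N : Int) - ((0 * 0 : Nat) : Int)) by push_cast; ring,
      show (5 : Int) = 10 * ((0 : Nat) : Int) + 5 by norm_num]
    apply hA _ 0 (by omega)
    rw [jsFuel, show (5 * (N : Int)) = ((5 * N : Nat) : Int) by push_cast; ring,
      Int.toNat_natCast, show ((2 : Int)).toNat = 2 from rfl]
    omega
  rw [hloop, show (10 * ((10000 : Nat) : Int) + 5) = (100005 : Int) by norm_num]
  decide

-- B's value for prec = 1: the leading digit of sqrt(100*n)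
lemma B_val1 (N k : Nat) (h1 : 10 ^ k ≤ Nat.sqrt (N * 100)) (h2 : Nat.sqrt (N * 100) < 10 ^ (k + 1)) :
    jarvis_sqrt_sum_alt (N : Int) (1 : Int) = ((Nat.sqrt (N * 100) / 10 ^ k : Nat) : Int) := by
  rw [show (1 : Int) = ((1 : Nat) : Int) from rfl, alt_char N 1 (le_refl 1),
    show (100 : Nat) ^ 1 = 100 from rfl]
  rw [toDigits_take1 k _ h1 h2]
  have hdlt : Nat.sqrt (N * 100) / 10 ^ k < 10 := by
    rw [Nat.div_lt_iff_lt_mul (by positivity)]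
    calc Nat.sqrt (N * 100) < 10 ^ (k + 1) := h2
    _ = 10 * 10 ^ k := by ring
  simp [rtDigit _ hdlt]

-- B's value for prec = 2: the two leading digits of sqrt(10000*n)
lemma B_val2 (N k : Nat) (hk : 1 ≤ k) (h1 : 10 ^ k ≤ Nat.sqrt (N * 10000))
    (h2 : Nat.sqrt (N * 10000) < 10 ^ (k + 1)) :
    jarvis_sqrt_sum_alt (N : Int) (2 : Int)
      = ((Nat.sqrt (N * 10000) / 10 ^ k : Nat) : Int)
        + ((Nat.sqrt (N * 10000) / 10 ^ (k - 1) % 10 : Nat) : Int) := by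
  rw [show (2 : Int) = ((2 : Nat) : Int) from rfl, alt_char N 2 (by norm_num),
    show (100 : Nat) ^ 2 = 10000 by norm_num]
  rw [toDigits_take2 k _ hk h1 h2]
  have hdlt : Nat.sqrt (N * 10000) / 10 ^ k < 10 := by
    rw [Nat.div_lt_iff_lt_mul (by positivity)]
    calc Nat.sqrt (N * 10000) < 10 ^ (k + 1) := h2
    _ = 10 * 10 ^ k := by ring
  simp [rtDigit _ hdlt, rtDigit _ (Nat.mod_lt _ (by norm_num))]

-- sqrt bracketing helpers
lemma sqrt_ge {m a : Nat} (h : a * a ≤ m) : a ≤ Nat.sqrt m := Nat.le_sqrt.mpr h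
lemma sqrt_ltb {m a : Nat} (h : m < a * a) : Nat.sqrt m < a := Nat.sqrt_lt.mpr h

-- the good region: n ≥ 1, prec ≥ 1, n < 10^(2*prec+4)
lemma main_region {N p : Nat} (hN : 1 ≤ N) (hp : 1 ≤ p) (hbig : N < 10 ^ (2 * p + 4)) :
    jarvis_sqrt_sum (N : Int) (p : Int) = jarvis_sqrt_sum_alt (N : Int) (p : Int) := by
  have hI1 : 1 ≤ Ld (sqd N 0) := Ld_pos _
  have hN0 : sqd N 0 = Nat.sqrt N := by unfold sqd; norm_num
  have hIle : Ld (sqd N 0) ≤ p + 2 := by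
    apply Ld_le_of_lt_pow (sqd_pos hN 0)
    by_contra hcon
    push_neg at hcon
    have h1 : 10 ^ (p + 2) * 10 ^ (p + 2) ≤ sqd N 0 * sqd N 0 := Nat.mul_le_mul hcon hcon
    have h2 : sqd N 0 * sqd N 0 ≤ N * 100 ^ 0 := sqd_sq_le N 0
    have h3 : 10 ^ (p + 2) * 10 ^ (p + 2) = 10 ^ (2 * p + 4) := by ring
    simp only [pow_zero, mul_one] at h2
    omega
  -- A side
  have hA : jarvis_sqrt_sum (N : Int) (p : Int)
      = pyDigitSum ((100 * sqd N (p + 2 - Ld (sqd N 0)) + 5 : Nat) : Int) (p : Int) := by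
    rw [jarvis_sqrt_sum]
    congr 1
    have ea : (5 * (N : Int)) = 5 * (((N * 100 ^ 0 : Nat) : Int) - ((0 * 0 : Nat) : Int)) := by
      push_cast; ring
    have eb : (5 : Int) = 10 * ((0 : Nat) : Int) + 5 := by norm_num
    rw [ea, eb]
    apply jsLoop_main hN hp hbig
    · omega
    · intro _; exact Nat.zero_le _
    · intro e' he'; omega
    · have hs : sqd N 0 ≤ N := by rw [hN0]; exact Nat.sqrt_le_self N
      have hfuel : jsFuel (N : Int) (p : Int) = 5 * N + 11 * (p + 4) + 12 := by
        rw [jsFuel, show (5 * (N : Int)) = ((5 * N : Nat) : Int) by push_cast; ring,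
          Int.toNat_natCast, Int.toNat_natCast]
      omega
  -- B side
  have hMcast : ((N : Int) * 100 ^ ((p : Int)).toNat) = ((N * 100 ^ p : Nat) : Int) := by
    rw [Int.toNat_natCast]; push_cast; ring
  have hB : jarvis_sqrt_sum_alt (N : Int) (p : Int)
      = pyDigitSum ((sqd N p : Nat) : Int) (p : Int) := by
    rw [jarvis_sqrt_sum_alt, if_neg (by exact_mod_cast by omega : ¬ ((p : Int) ≤ 0))]
    congr 1
    rw [hMcast]
    have hM0 : (0 : Int) ≤ ((N * 100 ^ p : Nat) : Int) := Int.natCast_nonneg _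
    rw [bsLoop_correct _ 0 _ (le_refl 0) (by simpa using hM0) (by nlinarith [hM0]) (by omega)]
    rw [Int.toNat_natCast]
    rfl
  rw [hA, hB, pyDigitSum_natCast, pyDigitSum_natCast]
  congr 1
  apply congrArg
  -- digits of 100*s+5 : strip the two appended characters
  have hsT1 : 1 ≤ sqd N (p + 2 - Ld (sqd N 0)) := sqd_pos hN _
  have hlenT : Ld (sqd N (p + 2 - Ld (sqd N 0))) = p + 2 := by
    rw [sqd_len hN]; omega
  have e1 : 100 * sqd N (p + 2 - Ld (sqd N 0)) + 5
      = 10 * (10 * sqd N (p + 2 - Ld (sqd N 0)) + 0) + 5 := by ring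
  rw [e1, toDigits_app _ 5 (by omega) (by norm_num), toDigits_app _ 0 (by omega) (by norm_num)]
  rw [List.take_append_of_le_length, List.take_append_of_le_length]
  · -- take p (digits s_T) = take p (digits s_p)
    rcases le_total (p + 2 - Ld (sqd N 0)) p with hle | hle
    · have h := take_stable hN p (p - (p + 2 - Ld (sqd N 0))) (p + 2 - Ld (sqd N 0))
        (by rw [hlenT]; omega)
      rw [show (p + 2 - Ld (sqd N 0)) + (p - (p + 2 - Ld (sqd N 0))) = p by omega] at h
      exact h.symm
    · have h := take_stable hN p ((p + 2 - Ld (sqd N 0)) - p) p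
        (by rw [sqd_len hN]; omega)
      rw [show p + ((p + 2 - Ld (sqd N 0)) - p) = p + 2 - Ld (sqd N 0) by omega] at h
      exact h
  · show p ≤ (Nat.toDigits 10 _).length
    have : (Nat.toDigits 10 (sqd N (p + 2 - Ld (sqd N 0)))).length = p + 2 := hlenT
    omega
  · rw [List.length_append]
    show p ≤ (Nat.toDigits 10 _).length + 1
    have : (Nat.toDigits 10 (sqd N (p + 2 - Ld (sqd N 0)))).length = p + 2 := hlenT
    omega

-- ===== VERDICT (by name: the statement is the Claim_ definition above) =====
theorem jarvis_sqrt_sum_spec : Claim_unchanged_jarvis_sqrt_sum := by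
  intro n prec hDom hPre hnD
  by_cases hp3 : prec ≤ -3
  · -- the length test fails immediately; both sides return 0
    have hstop : jsLoop prec (jsFuel n prec) (5 * n) 5 = 5 := by
      apply jsLoop_stop
      · rw [show (5 : Int) = ((5 : Nat) : Int) by norm_num, toChars_natCast]
        rw [toDigits_small (by norm_num : (5:Nat) < 10)]
        simp only [List.length_singleton]
        omega
      · rw [jsFuel]; omega
    rw [jarvis_sqrt_sum, hstop, jarvis_sqrt_sum_alt, if_pos (by omega)]
    rw [pyDigitSum]
    have hk : prec = -(((-prec).toNat : Nat) : Int) := by omega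
    rw [hk, PySem.List.slice_to_neg_natCast _ _ (by omega)]
    rw [show (5 : Int) = ((5 : Nat) : Int) by norm_num, toChars_natCast,
      toDigits_small (by norm_num : (5:Nat) < 10)]
    rw [show ([Nat.digitChar 5].length - (-prec).toNat) = 0 by simp; omega]
    simp
  · have hn1 : 1 ≤ n := hPre.resolve_right hp3
    by_cases hm2 : prec = -2
    · -- two iterations, then the test fails with b = 15; both sides return 0
      subst hm2
      obtain ⟨f, hf⟩ : ∃ f, jsFuel n (-2) = f + 2 := ⟨jsFuel n (-2) - 2, by rw [jsFuel]; omega⟩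
      rw [jarvis_sqrt_sum, hf]
      simp only [jsLoop]
      rw [if_pos (by decide : ((PySem.Int.toChars 5).length : Int) ≤ -2 + 3)]
      rw [if_pos (by omega : (5 : Int) ≤ 5 * n)]
      rw [if_neg (by decide : ¬ (((PySem.Int.toChars (5 + 10)).length : Int) ≤ -2 + 3))]
      rw [show pyDigitSum (5 + 10) (-2) = 0 by decide]
      rw [jarvis_sqrt_sum_alt, if_pos (by omega)]
    · by_cases hm1 : prec = -1
      · -- inside D_
        exact absurd (show D_jarvis_sqrt_sum n prec from Or.inl ⟨hn1, hm1⟩) hnD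
      · by_cases h0 : prec = 0
        · subst h0
          rw [jarvis_sqrt_sum, pyDigitSum_zero, jarvis_sqrt_sum_alt, if_pos (by omega)]
        · -- prec ≥ 1
          have hp1 : 1 ≤ prec := by omega
          have hdom : n ≤ 2147483648 := by
            simp only [Dom_jarvis_sqrt_sum, pvDomInt, Bool.and_eq_true, decide_eq_true_eq] at hDom
            exact hDom.1.2
          have hn : n = ((n.toNat : Nat) : Int) := (Int.toNat_of_nonneg (by omega)).symm
          have hprec : prec = ((prec.toNat : Nat) : Int) := (Int.toNat_of_nonneg (by omega)).symm
          by_cases hbigI : n < (10 : Int) ^ (2 * prec.toNat + 4)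
          · -- below the overflow threshold: the two digit streams agree literally
            have hbig : n.toNat < 10 ^ (2 * prec.toNat + 4) := by
              have hx : ((n.toNat : Nat) : Int) < (((10 : Nat) ^ (2 * prec.toNat + 4) : Nat) : Int) := by
                push_cast
                omega
              exact_mod_cast hx
            rw [hn, hprec]
            exact main_region (by omega) (by omega) hbig
          · -- overflow region, but outside D_: only prec = 1, 2 fit the domain,
            -- and there the first prec digits of sqrt(n) are 10…0, so both sides give 1
            push_neg at hbigI
            have hple : prec = 1 ∨ prec = 2 := by
              by_contra hcon
              push_neg at hcon
              have hexp : 10 ≤ 2 * prec.toNat + 4 := by omega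
              have hpow : (10 : Int) ^ 10 ≤ (10 : Int) ^ (2 * prec.toNat + 4) :=
                pow_le_pow_right₀ (by norm_num) hexp
              have h10 : (2147483648 : Int) < 10 ^ 10 := by norm_num
              omega
            rcases hple with hpe | hpe
            · -- prec = 1
              subst hpe
              have hge : (1000000 : Int) ≤ n := by
                have ht1 : ((1 : Int)).toNat = 1 := rfl
                rw [ht1] at hbigI
                norm_num at hbigI
                exact hbigI
              have hnd1 : ¬ ((4000000 ≤ n ∧ n < 100000000) ∨ 400000000 ≤ n) :=
                fun h => hnD (show D_jarvis_sqrt_sum n 1 from Or.inr (Or.inl ⟨rfl, h⟩))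
              push_neg at hnd1
              rw [hn]
              have hsqA : 1000 ≤ Nat.sqrt n.toNat := sqrt_ge (by omega)
              rcases le_or_gt (4000000 : Int) n with hc | hc
              · -- n ∈ [10^8, 4*10^8)
                have hc8 : (100000000 : Int) ≤ n := hnd1.1 hc
                have hc8' : n < 400000000 := hnd1.2
                have hs1 : 100000 ≤ Nat.sqrt (n.toNat * 100) := sqrt_ge (by omega)
                have hs2 : Nat.sqrt (n.toNat * 100) < 200000 := sqrt_ltb (by omega)
                rw [A_one1 n.toNat hsqA,
                  B_val1 n.toNat 5 (by norm_num; omega)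
                    (by norm_num; omega)]
                have hd : Nat.sqrt (n.toNat * 100) / 10 ^ 5 = 1 := by
                  have : (10:Nat)^5 = 100000 := by norm_num
                  omega
                rw [hd]
                norm_num
              · -- n ∈ [10^6, 4*10^6)
                have hs1 : 10000 ≤ Nat.sqrt (n.toNat * 100) := sqrt_ge (by omega)
                have hs2 : Nat.sqrt (n.toNat * 100) < 20000 := sqrt_ltb (by omega)
                rw [A_one1 n.toNat hsqA,
                  B_val1 n.toNat 4 (by norm_num; omega)
                    (by norm_num; omega)]
                have hd : Nat.sqrt (n.toNat * 100) / 10 ^ 4 = 1 := by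
                  have : (10:Nat)^4 = 10000 := by norm_num
                  omega
                rw [hd]
                norm_num
            · -- prec = 2, n ∈ [10^8, 1.21*10^8)
              subst hpe
              have hge : (100000000 : Int) ≤ n := by
                have ht2 : ((2 : Int)).toNat = 2 := rfl
                rw [ht2] at hbigI
                norm_num at hbigI
                exact hbigI
              have hnd2 : ¬ (121000000 ≤ n) := fun h => hnD (show D_jarvis_sqrt_sum n 2 from Or.inr (Or.inr ⟨rfl, h⟩))
              push_neg at hnd2
              rw [hn]
              have hsqA : 10000 ≤ Nat.sqrt n.toNat := sqrt_ge (by omega)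
              have hs1 : 1000000 ≤ Nat.sqrt (n.toNat * 10000) := sqrt_ge (by omega)
              have hs2 : Nat.sqrt (n.toNat * 10000) < 1100000 := sqrt_ltb (by omega)
              rw [A_one2 n.toNat hsqA,
                B_val2 n.toNat 6 (by norm_num)
                  (by norm_num; omega)
                  (by norm_num; omega)]
              have hd1 : Nat.sqrt (n.toNat * 10000) / 10 ^ 6 = 1 := by
                have : (10:Nat)^6 = 1000000 := by norm_num
                omega
              have hd2 : Nat.sqrt (n.toNat * 10000) / 10 ^ (6 - 1) % 10 = 0 := by
                have : (10:Nat)^(6-1) = 100000 := by norm_num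
                omega
              rw [hd1, hd2]
              norm_num

theorem jarvis_sqrt_sum_changed : Claim_changed_jarvis_sqrt_sum := by
  unfold Claim_changed_jarvis_sqrt_sum; decide

theorem jarvis_sqrt_sum_tight : Claim_exact_jarvis_sqrt_sum := by
  intro n prec hDom hPre hD
  have hdom : n ≤ 2147483648 := by
    simp only [Dom_jarvis_sqrt_sum, pvDomInt, Bool.and_eq_true, decide_eq_true_eq] at hDom
    exact hDom.1.2
  rcases hD with ⟨hn1, hm1⟩ | ⟨hpe, hint⟩ | ⟨hpe, hint⟩
  · -- prec = -1: B returns 0, A returns the digit sum of its leftover window, ≥ 1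
    subst hm1
    have hn : n = ((n.toNat : Nat) : Int) := (Int.toNat_of_nonneg (by omega)).symm
    have hN1 : 1 ≤ n.toNat := by omega
    have hB : jarvis_sqrt_sum_alt n (-1) = 0 := by
      rw [jarvis_sqrt_sum_alt, if_pos (by norm_num)]
    rw [hB, jarvis_sqrt_sum]
    have hfuel : jsFuel n (-1) = 5 * n.toNat + 56 := by
      rw [jsFuel, show ((-1 : Int)).toNat = 0 from rfl]
      omega
    rcases le_or_gt (Nat.sqrt n.toNat) 9 with hs | hs
    · -- small sqrt: loop ends at b = 100*sqrt+5, slice [:-1] keeps digits of 10*sqrt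
      have hloop : jsLoop (-1) (jsFuel n (-1)) (5 * n) 5
          = ((100 * Nat.sqrt n.toNat + 5 : Nat) : Int) := by
        conv_lhs => rw [hn]
        rw [show (5 * ((n.toNat : Nat) : Int)) = 5 * (((n.toNat : Nat) : Int) - ((0 * 0 : Nat) : Int)) by
          push_cast; ring,
          show (5 : Int) = 10 * ((0 : Nat) : Int) + 5 by norm_num]
        apply jsSmall n.toNat hN1 hs _ 0 (by omega)
        rw [← hn, hfuel]
        omega
      rw [hloop]
      set sq0 := Nat.sqrt n.toNat with hsq0
      have hs1 : 1 ≤ sq0 := Nat.le_sqrt.mpr (by nlinarith [hN1])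
      have hdig : Nat.toDigits 10 (100 * sq0 + 5)
          = [Nat.digitChar sq0, Nat.digitChar 0, Nat.digitChar 5] := by
        have e1 : 100 * sq0 + 5 = 10 * (10 * sq0) + 5 := by ring
        have e2 : 10 * sq0 = 10 * sq0 + 0 := by ring
        rw [e1, toDigits_app _ 5 (by omega) (by norm_num)]
        conv_lhs => rw [e2]
        rw [toDigits_app _ 0 (by omega) (by norm_num), toDigits_small (by omega)]
        rfl
      rw [pyDigitSum, toChars_natCast, hdig, PySem.List.slice_to_neg_one]
      rw [show List.dropLast [Nat.digitChar sq0, Nat.digitChar 0, Nat.digitChar 5]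
          = [Nat.digitChar sq0, Nat.digitChar 0] from rfl]
      simp only [List.map, List.sum_cons, List.sum_nil]
      rw [rtDigit sq0 (by omega), rtDigit 0 (by norm_num)]
      have : (1 : Int) ≤ (sq0 : Int) := by exact_mod_cast hs1
      omega
    · -- sqrt ≥ 10: the climb is cut at D = 10, A returns digitsum("10") = 1
      have hloop : jsLoop (-1) (jsFuel n (-1)) (5 * n) 5 = 10 * ((10 : Nat) : Int) + 5 := by
        conv_lhs => rw [hn]
        rw [show (5 * ((n.toNat : Nat) : Int)) = 5 * (((n.toNat : Nat) : Int) - ((0 * 0 : Nat) : Int)) by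
          push_cast; ring,
          show (5 : Int) = 10 * ((0 : Nat) : Int) + 5 by norm_num]
        apply jsClimb n.toNat (-1) 10 (by omega)
          (by rw [show Ld (10 * 10 + 5) = 3 by decide]; norm_num)
          (fun D hD => by
            have h95 : Ld (10 * D + 5) ≤ Ld 95 := Ld_mono (by omega)
            have h2 : Ld 95 = 2 := by decide
            have h3 : Ld (10 * D + 5) ≤ 2 := by omega
            push_cast
            omega)
          _ 0 (by omega)
        rw [← hn, hfuel]
        omega
      rw [hloop, show (10 * ((10 : Nat) : Int) + 5) = (105 : Int) by norm_num]
      decide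
  · -- prec = 1, first digit of sqrt(n) is ≥ 2 while A returns 1
    subst hpe
    have hn : n = ((n.toNat : Nat) : Int) := (Int.toNat_of_nonneg (by omega)).symm
    rw [hn]
    have hsqA : 1000 ≤ Nat.sqrt n.toNat := sqrt_ge (by omega)
    rcases hint with ⟨hge, hlt⟩ | hge
    · -- n ∈ [4*10^6, 10^8)
      have hs1 : 20000 ≤ Nat.sqrt (n.toNat * 100) := sqrt_ge (by omega)
      have hs2 : Nat.sqrt (n.toNat * 100) < 100000 := sqrt_ltb (by omega)
      rw [A_one1 n.toNat hsqA,
        B_val1 n.toNat 4 (by norm_num; omega)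
          (by norm_num; omega)]
      have hd : 2 ≤ Nat.sqrt (n.toNat * 100) / 10 ^ 4 := by
        have : (10:Nat)^4 = 10000 := by norm_num
        omega
      have : (2 : Int) ≤ ((Nat.sqrt (n.toNat * 100) / 10 ^ 4 : Nat) : Int) := by exact_mod_cast hd
      omega
    · -- n ∈ [4*10^8, 2^31]
      have hs1 : 200000 ≤ Nat.sqrt (n.toNat * 100) := sqrt_ge (by omega)
      have hs2 : Nat.sqrt (n.toNat * 100) < 1000000 := sqrt_ltb (by omega)
      rw [A_one1 n.toNat hsqA,
        B_val1 n.toNat 5 (by norm_num; omega)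
          (by norm_num; omega)]
      have hd : 2 ≤ Nat.sqrt (n.toNat * 100) / 10 ^ 5 := by
        have : (10:Nat)^5 = 100000 := by norm_num
        omega
      have : (2 : Int) ≤ ((Nat.sqrt (n.toNat * 100) / 10 ^ 5 : Nat) : Int) := by exact_mod_cast hd
      omega
  · -- prec = 2, the two leading digits of sqrt(n) sum to ≥ 2 while A returns 1
    subst hpe
    have hn : n = ((n.toNat : Nat) : Int) := (Int.toNat_of_nonneg (by omega)).symm
    rw [hn]
    have hsqA : 10000 ≤ Nat.sqrt n.toNat := sqrt_ge (by omega)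
    have hs1 : 1100000 ≤ Nat.sqrt (n.toNat * 10000) := sqrt_ge (by omega)
    have hs2 : Nat.sqrt (n.toNat * 10000) < 10000000 := sqrt_ltb (by omega)
    rw [A_one2 n.toNat hsqA,
      B_val2 n.toNat 6 (by norm_num)
        (by norm_num; omega)
        (by norm_num; omega)]
    have h65 : (10:Nat)^6 = 1000000 := by norm_num
    have h55 : (10:Nat)^(6-1) = 100000 := by norm_num
    have hden : Nat.sqrt (n.toNat * 10000) / 10 ^ 6
        = Nat.sqrt (n.toNat * 10000) / 10 ^ (6 - 1) / 10 := by
      rw [Nat.div_div_eq_div_mul]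
      norm_num
    intro heq
    rw [hden] at heq
    have heqn : (1 : Nat) = Nat.sqrt (n.toNat * 10000) / 10 ^ (6 - 1) / 10
        + Nat.sqrt (n.toNat * 10000) / 10 ^ (6 - 1) % 10 := by exact_mod_cast heq
    have hm : 11 ≤ Nat.sqrt (n.toNat * 10000) / 10 ^ (6 - 1) := by
      rw [h55]
      omega
    omega
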